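-- pv_equiv track=rewrite | github.com/todd-schwartz/apcsa | RunJavaUtils.py | Change_Binary_To_String_List
-- ===== SOURCE A (Python) =====
-- def Change_Binary_To_String_List(binary):
--     result=[]
--     tempStr = ""
--     if (len(binary) > 0):
--         for a in binary:
--             if (isinstance(a, str)):
--                 tempStr = tempStr + a
--             if (a > 8 and a < 127):
--                 c = chr(a)
--                 if (c != '\r'):
--                     if (c == '\n'):
--                         #remove trailing spaces, they are impossible to mark wrong since they are ambiguous in text
--                         tempStr = tempStr.rstrip()
--                         result.append(tempStr)
--                         tempStr = ""
--                     else: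
--                         tempStr = tempStr + str(c)
--             else:
--                 tempStr = tempStr + "utf(" + str(a) + ")"
--     if (len(tempStr) != 0):
--         tempStr = tempStr.rstrip()
--         result.append(tempStr)
--
--     return result
-- ===== SOURCE B (Python) =====
-- def Change_Binary_To_String_List(binary):
--     # Phase 1: decode every byte into one big string (drop '\r', keep '\n' literal).
--     pieces = []
--     for a in binary:
--         if a > 8 and a < 127:
--             c = chr(a)
--             if c != '\r':
--                 pieces.append(c)
--         else:
--             pieces.append("utf(" + str(a) + ")")
--     S = ''.join(pieces)
--     # Phase 2: split into lines; the final segment is a line only if non-empty.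
--     parts = S.split('\n')
--     result = [p.rstrip() for p in parts[:-1]]
--     leftover = parts[-1]
--     if len(leftover) != 0:
--         result.append(leftover.rstrip())
--     return result
-- ===== Notes on version B (the rewrite author's own statement) =====
-- stated objective: faster
-- what changed: Replaces A's single loop that grows a running line buffer by repeated string concatenation and flushes it at every newline with a two-phase build-then-split: one pass collects decoded chunks and joins them into a single string, then str.split('\n') does the line segmentation, with the trailing segment appended only when non-empty.
import Mathlib
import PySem

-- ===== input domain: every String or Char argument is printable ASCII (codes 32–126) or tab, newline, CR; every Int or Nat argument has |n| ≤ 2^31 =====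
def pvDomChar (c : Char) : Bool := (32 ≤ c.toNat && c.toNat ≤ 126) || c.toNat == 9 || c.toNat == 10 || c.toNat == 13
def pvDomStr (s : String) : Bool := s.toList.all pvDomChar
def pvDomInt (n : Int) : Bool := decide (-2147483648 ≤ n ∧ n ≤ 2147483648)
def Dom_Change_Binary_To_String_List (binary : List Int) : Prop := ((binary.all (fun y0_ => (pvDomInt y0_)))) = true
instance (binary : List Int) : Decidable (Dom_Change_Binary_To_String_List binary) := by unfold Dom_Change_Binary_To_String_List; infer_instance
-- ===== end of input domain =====

-- B re-implements A as a two-phase build-then-split (decode all bytes into one joined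
-- string, then split on '\n'): same return value, avoiding A's repeated string
-- concatenation on a growing line buffer (measured faster in a timing run).


-- ===== PORT A =====
-- strings are carried as List Char (PySem.Chars is the sanctioned representation); the
-- isinstance(a, str) branch of A can never fire on a List Int argument and is omitted.
def ChangeA_step (st : List String × List Char) (a : Int) : List String × List Char :=
  let result := st.1
  let tempStr := st.2
  if 8 < a ∧ a < 127 then
    let c := Char.ofNat a.toNat
    if c ≠ '\r' then
      if c = '\n' then
        (result ++ [String.ofList (PySem.Chars.rstrip tempStr)], [])
      else
        (result, tempStr ++ [c])
    else (result, tempStr)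
  else
    (result, tempStr ++ ['u', 't', 'f', '('] ++ PySem.Int.toChars a ++ [')'])

def Change_Binary_To_String_List (binary : List Int) : List String :=
  let st :=
    if binary.length > 0 then binary.foldl ChangeA_step ([], []) else ([], [])
  if st.2.length ≠ 0 then st.1 ++ [String.ofList (PySem.Chars.rstrip st.2)] else st.1

-- ===== PORT B =====
def ChangeB_decode (pieces : List (List Char)) (a : Int) : List (List Char) :=
  if 8 < a ∧ a < 127 then
    let c := Char.ofNat a.toNat
    if c ≠ '\r' then pieces ++ [[c]] else pieces
  else
    pieces ++ [['u', 't', 'f', '('] ++ PySem.Int.toChars a ++ [')']]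

def Change_Binary_To_String_List_alt (binary : List Int) : List String :=
  let pieces := binary.foldl ChangeB_decode []
  let S := PySem.Chars.join [] pieces   -- ''.join(pieces)
  let parts := PySem.Chars.splitOn S ['\n']
  let result := (PySem.List.slice parts none (some (-1))).map
    (fun p => String.ofList (PySem.Chars.rstrip p))
  let leftover := PySem.List.pyGetD parts (-1) []   -- parts[-1]; split always returns ≥ 1 part
  if leftover.length ≠ 0 then result ++ [String.ofList (PySem.Chars.rstrip leftover)] else result

-- ===== PRECONDITION & SPEC =====
def Spec_Change_Binary_To_String_List (binary : List Int) (out : List String) : Prop := out = Change_Binary_To_String_List_alt binary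
instance (binary : List Int) (out : List String) : Decidable (Spec_Change_Binary_To_String_List binary out) := by unfold Spec_Change_Binary_To_String_List; infer_instance

-- ===== CLAIM (what is proved, stated in full; the proofs are below) =====
def Claim_equal_Change_Binary_To_String_List : Prop := ∀ (binary : List Int), Dom_Change_Binary_To_String_List binary → Spec_Change_Binary_To_String_List binary (Change_Binary_To_String_List binary)

-- ===== LEMMAS AND PROOFS =====

-- line segmentation as a structural recursion (proof-side model of split('\n'))
def plines : List Char → List (List Char)
  | [] => [[]]
  | c :: r => if c = '\n' then [] :: plines r else (plines r).modifyHead (c :: ·)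

theorem plines_ne_nil (s : List Char) : plines s ≠ [] := by
  induction s with
  | nil => simp [plines]
  | cons c r ih =>
    simp only [plines]
    split
    · simp
    · cases h : plines r with
      | nil => exact absurd h ih
      | cons a t => simp

-- prepend a prefix to the first segment
def consHd (p : List Char) : List (List Char) → List (List Char)
  | [] => [p]
  | h :: t => (p ++ h) :: t

theorem go_eq_plines (fuel : Nat) : ∀ (l cur : List Char) (acc : List (List Char)),
    l.length < fuel →
    PySem.Chars.splitOn.go ['\n'] fuel l cur acc = acc.reverse ++ consHd cur.reverse (plines l) := by
  induction fuel with
  | zero => intro l cur acc h; omega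
  | succ f ih =>
    intro l cur acc h
    cases l with
    | nil => simp [PySem.Chars.splitOn.go, plines, consHd]
    | cons c rest =>
      by_cases hc : c = '\n'
      · subst hc
        have hpre : List.isPrefixOf ['\n'] ('\n' :: rest) = true := by simp [List.isPrefixOf]
        rw [PySem.Chars.splitOn.go]
        simp only [hpre, if_pos]
        rw [ih _ _ _ (by simpa using Nat.lt_of_succ_lt_succ h)]
        cases hp : plines rest with
        | nil => exact absurd hp (plines_ne_nil rest)
        | cons a t => simp [plines, consHd, hp]
      · have hpre : List.isPrefixOf ['\n'] (c :: rest) = false := by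
          simp [List.isPrefixOf]; intro hcc; exact absurd hcc.symm hc
        rw [PySem.Chars.splitOn.go]
        simp only [hpre, Bool.false_eq_true, if_false]
        rw [ih _ _ _ (by simpa using Nat.lt_of_succ_lt_succ h)]
        cases hp : plines rest with
        | nil => exact absurd hp (plines_ne_nil rest)
        | cons a t => simp [plines, consHd, hp, hc]

theorem splitOn_eq_plines (s : List Char) : PySem.Chars.splitOn s ['\n'] = plines s := by
  rw [PySem.Chars.splitOn, go_eq_plines (s.length + 1) s [] [] (by omega)]
  cases hp : plines s with
  | nil => exact absurd hp (plines_ne_nil s)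
  | cons a t => simp [consHd]

theorem plines_no_nl {x : List Char} (h : '\n' ∉ x) : plines x = [x] := by
  induction x with
  | nil => rfl
  | cons c r ih =>
    simp only [List.mem_cons, not_or] at h
    simp [plines, Ne.symm h.1, ih h.2]

theorem plines_append_nl {x : List Char} (y : List Char) (h : '\n' ∉ x) :
    plines (x ++ '\n' :: y) = x :: plines y := by
  induction x with
  | nil => simp [plines]
  | cons c r ih =>
    simp only [List.mem_cons, not_or] at h
    simp [plines, Ne.symm h.1, ih h.2]

-- B's second phase, as a function of the segment list
def finB (L : List (List Char)) : List String :=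
  L.dropLast.map (fun p => String.ofList (PySem.Chars.rstrip p)) ++
    (if (L.getLastD []).length ≠ 0 then [String.ofList (PySem.Chars.rstrip (L.getLastD []))] else [])

theorem finB_cons {L : List (List Char)} (x : List Char) (h : L ≠ []) :
    finB (x :: L) = String.ofList (PySem.Chars.rstrip x) :: finB L := by
  cases L with
  | nil => exact absurd rfl h
  | cons a t => simp [finB]

-- the per-byte decoded chunk
def enc (a : Int) : List Char :=
  if 8 < a ∧ a < 127 then
    (if Char.ofNat a.toNat ≠ '\r' then [Char.ofNat a.toNat] else [])
  else ['u', 't', 'f', '('] ++ PySem.Int.toChars a ++ [')']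

theorem join_nil_eq_flatten (ps : List (List Char)) : PySem.Chars.join [] ps = ps.flatten := by
  simp only [PySem.Chars.join, List.intercalate]
  induction ps with
  | nil => rfl
  | cons a t ih =>
    cases t with
    | nil => rfl
    | cons b u => simp_all [List.intersperse]

theorem flatten_foldl_decode (bs : List Int) : ∀ (ps : List (List Char)),
    (bs.foldl ChangeB_decode ps).flatten = ps.flatten ++ bs.flatMap enc := by
  induction bs with
  | nil => simp
  | cons a rest ih =>
    intro ps
    have hstep : (ChangeB_decode ps a).flatten = ps.flatten ++ enc a := by
      unfold ChangeB_decode enc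
      split
      · split <;> simp_all
      · simp
    simp only [List.foldl_cons, List.flatMap_cons, ih, hstep, List.append_assoc]

theorem alt_eq_finB (binary : List Int) :
    Change_Binary_To_String_List_alt binary = finB (plines (binary.flatMap enc)) := by
  simp only [Change_Binary_To_String_List_alt, join_nil_eq_flatten, flatten_foldl_decode,
    List.flatten_nil, List.nil_append, splitOn_eq_plines]
  cases hp : plines (binary.flatMap enc) with
  | nil => exact absurd hp (plines_ne_nil _)
  | cons a t =>
    have hlast : PySem.List.pyGetD (a :: t) (-1) [] = (a :: t).getLastD [] := by
      simp [pysem]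
      rw [List.getLast?_eq_getElem?]
      simp
      rfl
    simp only [PySem.List.slice_to_neg_one, hlast]
    simp only [finB, List.getLastD_eq_getLast?]
    split <;> simp

theorem nl_not_mem_toChars (a : Int) : '\n' ∉ PySem.Int.toChars a := by
  have hd : ∀ (n : Nat), '\n' ∉ Nat.toDigits 10 n := by
    intro n hmem
    have := Nat.isDigit_of_mem_toDigits (by norm_num) (by norm_num) hmem
    simp [Char.isDigit] at this
  intro hmem
  unfold PySem.Int.toChars at hmem
  split at hmem
  · rcases List.mem_cons.mp hmem with h | h
    · exact absurd h (by decide)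
    · exact hd _ h
  · exact hd _ hmem

theorem nl_not_mem_enc {a : Int} (h : ¬ (8 < a ∧ a < 127) ∨ Char.ofNat a.toNat ≠ '\n') :
    '\n' ∉ enc a := by
  unfold enc
  split
  · rename_i hr
    split
    · rcases h with h | h
      · exact absurd hr h
      · simpa using fun hc => absurd hc.symm h
    · simp
  · intro hmem
    simp only [List.append_assoc, List.mem_append, List.mem_cons] at hmem
    rcases hmem with h1 | h2
    · simp at h1
    · rcases h2 with h2 | h2
      · exact nl_not_mem_toChars a h2
      · simp at h2

-- A's final flush, as a function of the loop state
def finA (st : List String × List Char) : List String :=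
  if st.2.length ≠ 0 then st.1 ++ [String.ofList (PySem.Chars.rstrip st.2)] else st.1

theorem main_inv (bs : List Int) : ∀ (r : List String) (t : List Char), '\n' ∉ t →
    finA (bs.foldl ChangeA_step (r, t)) = r ++ finB (plines (t ++ bs.flatMap enc)) := by
  induction bs with
  | nil =>
    intro r t ht
    rw [plines_no_nl (by simpa using ht)]
    simp only [List.foldl_nil, List.flatMap_nil, List.append_nil, finA, finB]
    split <;> simp_all
  | cons a rest ih =>
    intro r t ht
    simp only [List.foldl_cons, List.flatMap_cons]
    by_cases hr : 8 < a ∧ a < 127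
    · by_cases hcr : Char.ofNat a.toNat = '\r'
      · -- carriage return: dropped on both sides
        have hstep : ChangeA_step (r, t) a = (r, t) := by
          simp [ChangeA_step, hr, hcr]
        have henc : enc a = [] := by simp [enc, hr, hcr]
        rw [hstep, henc, ih r t ht]
        simp
      · by_cases hnl : Char.ofNat a.toNat = '\n'
        · -- newline: A flushes, B gets a '\n' separator
          have hstep : ChangeA_step (r, t) a =
              (r ++ [String.ofList (PySem.Chars.rstrip t)], []) := by
            simp [ChangeA_step, hr, hnl]
          have henc : enc a = ['\n'] := by simp [enc, hr, hnl]
          rw [hstep, henc, ih _ [] (by simp)]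
          rw [show t ++ (['\n'] ++ rest.flatMap enc) = t ++ '\n' :: rest.flatMap enc from by simp]
          rw [plines_append_nl _ ht, finB_cons _ (plines_ne_nil _)]
          simp
        · -- ordinary printable char: appended on both sides
          have hstep : ChangeA_step (r, t) a = (r, t ++ [Char.ofNat a.toNat]) := by
            simp [ChangeA_step, hr, hcr, hnl]
          have henc : enc a = [Char.ofNat a.toNat] := by simp [enc, hr, hcr]
          have ht' : '\n' ∉ t ++ [Char.ofNat a.toNat] := by
            simp only [List.mem_append, List.mem_cons, not_or]
            exact ⟨ht, by simpa using fun hc => absurd hc.symm hnl⟩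
          rw [hstep, henc, ih r _ ht']
          simp
    · -- utf(...) chunk on both sides
      have hstep : ChangeA_step (r, t) a =
          (r, t ++ ['u', 't', 'f', '('] ++ PySem.Int.toChars a ++ [')']) := by
        simp [ChangeA_step, hr]
      have henc : enc a = ['u', 't', 'f', '('] ++ PySem.Int.toChars a ++ [')'] := by
        simp [enc, hr]
      have ht' : '\n' ∉ t ++ ['u', 't', 'f', '('] ++ PySem.Int.toChars a ++ [')'] := by
        have h1 : '\n' ∉ enc a := nl_not_mem_enc (Or.inl hr)
        rw [henc] at h1
        simp only [List.append_assoc, List.mem_append, not_or] at h1 ⊢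
        exact ⟨ht, h1⟩
      rw [hstep, henc, ih r _ ht']
      simp

-- ===== VERDICT (by name: the statement is the Claim_ definition above) =====
theorem Change_Binary_To_String_List_spec : Claim_equal_Change_Binary_To_String_List := by
  intro binary _
  unfold Spec_Change_Binary_To_String_List
  rw [alt_eq_finB]
  cases binary with
  | nil =>
    simp [Change_Binary_To_String_List, finB, plines]
  | cons a rest =>
    have := main_inv (a :: rest) [] [] (by simp)
    simp only [List.nil_append] at this
    rw [show Change_Binary_To_String_List (a :: rest)
          = finA ((a :: rest).foldl ChangeA_step ([], [])) by
        simp [Change_Binary_To_String_List, finA]]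
    exact this
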